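-- pv_equiv track=rewrite | github.com/kerojohan/THN132N-emulator | ec40_lut_suite/04_universal_mp_analysis/investigation_scripts/solve_p_targeted.py | crc8_oregon
-- ===== SOURCE A (Python) =====
-- def crc8_oregon(nibbles, poly=0x07, init=0x00):
--     """
--     Implementació CRC-8 específica per Oregon Scientific.
--     - Input: Llista de nibbles.
--     - Processament: Nibble a nibble, o byte a byte?
--     - Bit order: MSB first per al CRC (segons documentació).
--     """
--     crc = init
--
--     # Processar per nibbles (com diu la doc: "send each nibble MSB first")
--     for n in nibbles:
--         # El nibble ja està en format 0..15 (0000..1111).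
--         # Si el CRC espera MSB first, i el nibble és 0xN, processem els 4 bits.
--
--         # Shift in 4 bits
--         for i in range(3, -1, -1):
--             bit = (n >> i) & 1
--
--             # CRC logic (MSB first)
--             # Check if MSB of CRC is 1
--             if (crc & 0x80):
--                 crc = (crc << 1) ^ poly
--             else:
--                 crc <<= 1
--
--             # Add new bit
--             if bit:
--                 crc ^= 1 # XOR into LSB? No, standard CRC shifts in.
--                 # Standard CRC-8 shift:
--                 # crc ^= (bit << 7)? No.
--
--     return crc & 0xFF
-- ===== SOURCE B (Python) =====
-- def _crc_entry(c, nib, p):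
--     crc = c
--     for i in (3, 2, 1, 0):
--         if crc & 0x80:
--             crc = ((crc << 1) ^ p) & 0xFF
--         else:
--             crc = (crc << 1) & 0xFF
--         if (nib >> i) & 1:
--             crc ^= 1
--     return crc
--
--
-- def crc8_oregon(nibbles, poly=0x07, init=0x00):
--     p = poly & 0xFF
--     table = [[_crc_entry(c, nib, p) for nib in range(16)] for c in range(256)]
--     crc = init & 0xFF
--     for n in nibbles:
--         crc = table[crc][n & 0xF]
--     return crc
-- ===== Notes on version B (the rewrite author's own statement) =====
-- stated objective: faster
-- what changed: B precomputes a 256x16 CRC lookup table from poly (simulating the four MSB-first bit steps once per (state, nibble) pair, masked to 8 bits) and then processes the message with one table lookup per nibble, keeping the state 8-bit throughout, instead of A's per-nibble 4-iteration bit loop on an accumulator whose width grows by 4 bits per nibble.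
import Mathlib
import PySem

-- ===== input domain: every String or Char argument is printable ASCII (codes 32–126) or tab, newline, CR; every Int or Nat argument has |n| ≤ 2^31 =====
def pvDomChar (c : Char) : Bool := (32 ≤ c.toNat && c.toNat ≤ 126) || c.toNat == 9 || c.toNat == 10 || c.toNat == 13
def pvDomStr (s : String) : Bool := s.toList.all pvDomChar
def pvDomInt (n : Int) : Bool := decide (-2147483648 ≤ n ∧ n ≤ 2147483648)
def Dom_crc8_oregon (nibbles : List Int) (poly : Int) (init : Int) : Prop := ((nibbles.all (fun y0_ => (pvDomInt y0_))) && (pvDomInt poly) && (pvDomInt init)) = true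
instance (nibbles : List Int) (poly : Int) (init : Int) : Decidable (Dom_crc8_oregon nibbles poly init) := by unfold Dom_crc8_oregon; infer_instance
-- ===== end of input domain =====

-- B replaces A's per-bit inner loop (on an accumulator that is never masked and so keeps growing)
-- by a 256x16 lookup table built once from poly, with the running state masked to 8 bits:
-- one lookup per nibble, same exact values on every input (measured faster on large inputs).

-- ===== PORT A =====
def crc8_oregon (nibbles : List Int) (poly : Int) (init : Int) : Int :=
  let crc := nibbles.foldl (fun crc n =>
    (PySem.List.pyRange 3 (-1) (-1)).foldl (fun crc i =>
      let bit := PySem.Int.band (n >>> i) 1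
      let crc := if PySem.Int.band crc 128 ≠ 0 then PySem.Int.bxor (crc <<< 1) poly else crc <<< 1
      if bit ≠ 0 then PySem.Int.bxor crc 1 else crc) crc) init
  PySem.Int.band crc 255

-- ===== PORT B =====
-- helper _crc_entry of Source B
def crcEntry (c : Int) (nib : Int) (p : Int) : Int :=
  ([3, 2, 1, 0] : List Int).foldl (fun crc i =>
    let crc := if PySem.Int.band crc 128 ≠ 0
               then PySem.Int.band (PySem.Int.bxor (crc <<< 1) p) 255
               else PySem.Int.band (crc <<< 1) 255
    if PySem.Int.band (nib >>> i) 1 ≠ 0 then PySem.Int.bxor crc 1 else crc) c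

def crc8_oregon_alt (nibbles : List Int) (poly : Int) (init : Int) : Int :=
  let p := PySem.Int.band poly 255
  let table := (PySem.List.pyRange 0 256).map (fun c =>
    (PySem.List.pyRange 0 16).map (fun nib => crcEntry c nib p))
  nibbles.foldl (fun crc n =>
    PySem.List.pyGetD (PySem.List.pyGetD table crc []) (PySem.Int.band n 15) 0)
    (PySem.Int.band init 255)

-- ===== PRECONDITION & SPEC =====
def Spec_crc8_oregon (nibbles : List Int) (poly : Int) (init : Int) (out : Int) : Prop := out = crc8_oregon_alt nibbles poly init
instance (nibbles : List Int) (poly : Int) (init : Int) (out : Int) : Decidable (Spec_crc8_oregon nibbles poly init out) := by unfold Spec_crc8_oregon; infer_instance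

-- ===== CLAIM (what is proved, stated in full; the proofs are below) =====
def Claim_equal_crc8_oregon : Prop := ∀ (nibbles : List Int) (poly : Int) (init : Int), Dom_crc8_oregon nibbles poly init → Spec_crc8_oregon nibbles poly init (crc8_oregon nibbles poly init)

-- ===== LEMMAS AND PROOFS =====

theorem pvNatXorMod (m n : Nat) : (m ^^^ n) % 256 = (m % 256) ^^^ (n % 256) := by
  have h : (256:Nat) = 2^8 := rfl
  rw [h]
  apply Nat.eq_of_testBit_eq
  intro i
  simp only [Nat.testBit_mod_two_pow, Nat.testBit_xor]
  by_cases hi : i < 8 <;> simp [hi]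

set_option maxRecDepth 4096 in
theorem pvCompl (x : Nat) (hx : x < 256) : 255 ^^^ x = 255 - x := by
  revert hx; revert x; decide

theorem pvXorCompl (x y : Nat) (hx : x < 256) (hy : y < 256) :
    x ^^^ (255 - y) = 255 - (x ^^^ y) := by
  have hxy : x ^^^ y < 256 := by
    have := Nat.xor_lt_two_pow (show x < 2^8 by omega) (show y < 2^8 by omega)
    simpa using this
  rw [← pvCompl y hy, ← pvCompl (x ^^^ y) hxy, ← Nat.xor_assoc, Nat.xor_comm x 255, Nat.xor_assoc]

theorem pvBxorMod' (a b : Int) :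
    (PySem.Int.bxor a b) % 256 = (((a % 256).toNat ^^^ (b % 256).toNat : Nat) : Int) := by
  unfold PySem.Int.bxor
  by_cases ha : 0 ≤ a <;> by_cases hb : 0 ≤ b
  · rw [if_pos ha, if_pos hb]
    have h3 : (a % 256).toNat = a.toNat % 256 := by omega
    have h4 : (b % 256).toNat = b.toNat % 256 := by omega
    rw [h3, h4, ← pvNatXorMod]
    generalize a.toNat ^^^ b.toNat = t
    omega
  · rw [if_pos ha, if_neg hb]
    have h3 : (a % 256).toNat = a.toNat % 256 := by omega
    have h4 : (b % 256).toNat = 255 - (-b-1).toNat % 256 := by omega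
    rw [h3, h4, pvXorCompl _ _ (by omega) (by omega), ← pvNatXorMod]
    generalize h : a.toNat ^^^ (-b-1).toNat = t
    have ht : (a.toNat ^^^ (-b-1).toNat) % 256 < 256 := by omega
    rw [h] at ht
    omega
  · rw [if_neg ha, if_pos hb]
    have h3 : (a % 256).toNat = 255 - (-a-1).toNat % 256 := by omega
    have h4 : (b % 256).toNat = b.toNat % 256 := by omega
    rw [h3, h4, Nat.xor_comm (255 - (-a-1).toNat % 256), pvXorCompl _ _ (by omega) (by omega), ← pvNatXorMod]
    rw [Nat.xor_comm b.toNat]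
    generalize h : (-a-1).toNat ^^^ b.toNat = t
    have ht : ((-a-1).toNat ^^^ b.toNat) % 256 < 256 := by omega
    rw [h] at ht
    omega
  · rw [if_neg ha, if_neg hb]
    have h3 : (a % 256).toNat = 255 - (-a-1).toNat % 256 := by omega
    have h4 : (b % 256).toNat = 255 - (-b-1).toNat % 256 := by omega
    rw [h3, h4]
    rw [pvXorCompl _ _ (by omega) (by omega), Nat.xor_comm (255 - (-a-1).toNat % 256),
        pvXorCompl _ _ (by omega) (by omega), Nat.xor_comm ((-b-1).toNat % 256), ← pvNatXorMod]
    generalize h : (-a-1).toNat ^^^ (-b-1).toNat = t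
    have ht : ((-a-1).toNat ^^^ (-b-1).toNat) % 256 < 256 := by omega
    rw [h] at ht
    omega

theorem pvBxorModMod (a b : Int) :
    (PySem.Int.bxor a b) % 256 = (PySem.Int.bxor (a % 256) (b % 256)) % 256 := by
  rw [pvBxorMod', pvBxorMod' (a % 256)]
  have h1 : a % 256 % 256 = a % 256 := by omega
  have h2 : b % 256 % 256 = b % 256 := by omega
  rw [h1, h2]

theorem pvBand255 (a : Int) : PySem.Int.band a 255 = a % 256 := by
  unfold PySem.Int.band
  rcases a with m | m
  · have h : m &&& 255 = m % 256 := by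
      have := Nat.and_two_pow_sub_one_eq_mod m 8
      norm_num at this; exact this
    simp [h]
  · have h : 255 &&& m = m % 256 := by
      rw [Nat.and_comm]
      have := Nat.and_two_pow_sub_one_eq_mod m 8
      norm_num at this; exact this
    simp [Int.negSucc_eq, h]
    omega

theorem pvBand15 (a : Int) : PySem.Int.band a 15 = a % 16 := by
  unfold PySem.Int.band
  rcases a with m | m
  · have h : m &&& 15 = m % 16 := by
      have := Nat.and_two_pow_sub_one_eq_mod m 4
      norm_num at this; exact this
    simp [h]
  · have h : 15 &&& m = m % 16 := by
      rw [Nat.and_comm]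
      have := Nat.and_two_pow_sub_one_eq_mod m 4
      norm_num at this; exact this
    simp [Int.negSucc_eq, h]
    omega

theorem pvNatAnd128 (m : Nat) : m &&& 128 = m / 128 % 2 * 128 := by
  have h := Nat.and_two_pow m 7
  rw [Nat.testBit_eq_decide_div_mod_eq] at h
  norm_num at h
  by_cases hd : m / 128 % 2 = 1 <;> simp [hd] at h <;> omega

theorem pvBand128 (a : Int) : PySem.Int.band a 128 = a % 256 / 128 * 128 := by
  unfold PySem.Int.band
  rcases a with m | m
  · simp
    rw [pvNatAnd128]
    omega
  · rw [if_neg (by omega), if_pos (by norm_num)]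
    have h1 : (-Int.negSucc m - 1).toNat = m := by omega
    have h2 : (128:Int).toNat = 128 := rfl
    rw [h1, h2, Nat.and_comm, pvNatAnd128]
    have h3 : Int.negSucc m = -(↑m + 1) := by omega
    rw [h3]
    omega

theorem pvBxor1Mod (x : Int) (h0 : 0 ≤ x) (h1 : x < 256) :
    (PySem.Int.bxor x 1) % 256 = PySem.Int.bxor x 1 := by
  unfold PySem.Int.bxor
  simp [h0]
  have h2 : x.toNat ^^^ 1 < 256 := by
    have := Nat.xor_lt_two_pow (show x.toNat < 2^8 by omega) (show (1:Nat) < 2^8 by norm_num)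
    simpa using this
  omega

theorem pvShr (a : Int) (k : Nat) : a >>> ((k : Nat) : Int) = a / (2:Int)^k := by
  rcases a with m | m
  · show ((m:Nat):Int) >>> ((k:Nat):Int) = ((m:Nat):Int) / 2^k
    rw [Int.shiftRight_natCast, Nat.shiftRight_eq_div_pow]
    push_cast
    rfl
  · rw [Int.shiftRight_negSucc, Nat.shiftRight_eq_div_pow]
    have hd : (0:Int) < 2^k := by positivity
    have h1 := Int.mul_ediv_add_emod (m:Int) ((2:Int)^k)
    have h3 := Int.emod_nonneg (m:Int) (by positivity : ((2:Int)^k) ≠ 0)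
    have h4 := Int.emod_lt_of_pos (m:Int) hd
    have key := (Int.ediv_emod_unique (a := -((m:Int)+1)) (b := (2:Int)^k)
        (q := -((m:Int)/(2:Int)^k + 1)) (r := (2:Int)^k - 1 - (m:Int) % (2:Int)^k) hd).mpr
        ⟨by linear_combination -h1, by omega, by omega⟩
    rw [Int.negSucc_eq, Int.negSucc_eq, key.1]
    have hm : ((m / 2^k : Nat) : Int) = (m:Int) / (2:Int)^k := by push_cast; rfl
    omega

theorem pvShl (a : Int) : a <<< (1 : Int) = a * 2 := by
  have h := Int.shiftLeft_eq_mul_pow a 1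
  norm_num at h
  convert h using 2

theorem pvBit (n j : Int) (h0 : 0 ≤ j) (h4 : j < 4) :
    PySem.Int.band (n >>> j) 1 = PySem.Int.band ((n % 16) >>> j) 1 := by
  obtain ⟨k, rfl⟩ : ∃ k : Nat, j = (k : Int) := ⟨j.toNat, by omega⟩
  rw [pvShr, pvShr, PySem.Int.band_one, PySem.Int.band_one,
      PySem.Int.mod_eq_emod_of_pos (by norm_num), PySem.Int.mod_eq_emod_of_pos (by norm_num)]
  have hk : k < 4 := by omega
  interval_cases k <;> norm_num <;> omega

def pvStepA (poly n j c : Int) : Int :=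
  let bit := PySem.Int.band (n >>> j) 1
  let crc := if PySem.Int.band c 128 ≠ 0 then PySem.Int.bxor (c <<< 1) poly else c <<< 1
  if bit ≠ 0 then PySem.Int.bxor crc 1 else crc

def pvStepB (p nib j c : Int) : Int :=
  let crc := if PySem.Int.band c 128 ≠ 0
             then PySem.Int.band (PySem.Int.bxor (c <<< 1) p) 255
             else PySem.Int.band (c <<< 1) 255
  if PySem.Int.band (nib >>> j) 1 ≠ 0 then PySem.Int.bxor crc 1 else crc

theorem pvStep (poly n j c : Int) (hj : 0 ≤ j) (hj4 : j < 4) :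
    (pvStepA poly n j c) % 256 = pvStepB (poly % 256) (n % 16) j (c % 256) := by
  simp only [pvStepA, pvStepB]
  have hmm : c % 256 % 256 = c % 256 := by omega
  have hcond : PySem.Int.band (c % 256) 128 = PySem.Int.band c 128 := by
    rw [pvBand128, pvBand128, hmm]
  rw [← pvBit n j hj hj4, hcond]
  have hXY : PySem.Int.bxor (c * 2) poly % 256 = PySem.Int.bxor (c % 256 * 2) (poly % 256) % 256 := by
    have e1 := pvBxorModMod (c * 2) poly
    have e2 := pvBxorModMod (c % 256 * 2) (poly % 256)
    have e3 : PySem.Int.bxor (c * 2 % 256) (poly % 256)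
        = PySem.Int.bxor (c % 256 * 2 % 256) (poly % 256 % 256) := by
      congr 1 <;> omega
    omega
  by_cases h : PySem.Int.band c 128 ≠ 0 <;> by_cases hb : PySem.Int.band (n >>> j) 1 ≠ 0
  · rw [if_pos h, if_pos h, if_pos hb, if_pos hb, pvShl, pvShl, pvBand255]
    have f1 := pvBxorModMod (PySem.Int.bxor (c * 2) poly) 1
    have f2 : PySem.Int.bxor (PySem.Int.bxor (c * 2) poly % 256) (1 % 256)
        = PySem.Int.bxor (PySem.Int.bxor (c % 256 * 2) (poly % 256) % 256) 1 := by
      have h1n : (1:Int) % 256 = 1 := by norm_num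
      rw [h1n, hXY]
    have f3 := pvBxor1Mod (PySem.Int.bxor (c % 256 * 2) (poly % 256) % 256) (by omega) (by omega)
    omega
  · rw [if_pos h, if_pos h, if_neg hb, if_neg hb, pvShl, pvShl, pvBand255]
    exact hXY
  · rw [if_neg h, if_neg h, if_pos hb, if_pos hb, pvShl, pvShl, pvBand255]
    have g1 := pvBxorModMod (c * 2) 1
    have g2 : PySem.Int.bxor (c * 2 % 256) (1 % 256) = PySem.Int.bxor (c % 256 * 2 % 256) 1 := by
      have h1n : (1:Int) % 256 = 1 := by norm_num
      rw [h1n]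
      congr 1
      omega
    have g3 := pvBxor1Mod (c % 256 * 2 % 256) (by omega) (by omega)
    omega
  · rw [if_neg h, if_neg h, if_neg hb, if_neg hb, pvShl, pvShl, pvBand255]
    omega

def pvTable (p : Int) : List (List Int) :=
  (PySem.List.pyRange 0 256).map (fun c =>
    (PySem.List.pyRange 0 16).map (fun nib => crcEntry c nib p))

theorem pvNib (poly n c : Int) :
    ((PySem.List.pyRange 3 (-1) (-1)).foldl (fun crc i =>
      let bit := PySem.Int.band (n >>> i) 1
      let crc := if PySem.Int.band crc 128 ≠ 0 then PySem.Int.bxor (crc <<< 1) poly else crc <<< 1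
      if bit ≠ 0 then PySem.Int.bxor crc 1 else crc) c) % 256
    = crcEntry (c % 256) (PySem.Int.band n 15) (PySem.Int.band poly 255) := by
  rw [pvBand15, pvBand255]
  have hr : PySem.List.pyRange 3 (-1) (-1) = [3, 2, 1, 0] := by decide
  have hA : ((PySem.List.pyRange 3 (-1) (-1)).foldl (fun crc i =>
      let bit := PySem.Int.band (n >>> i) 1
      let crc := if PySem.Int.band crc 128 ≠ 0 then PySem.Int.bxor (crc <<< 1) poly else crc <<< 1
      if bit ≠ 0 then PySem.Int.bxor crc 1 else crc) c)
      = pvStepA poly n 0 (pvStepA poly n 1 (pvStepA poly n 2 (pvStepA poly n 3 c))) := by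
    rw [hr]
    simp only [List.foldl_cons, List.foldl_nil, pvStepA]
  have hB : crcEntry (c % 256) (n % 16) (poly % 256)
      = pvStepB (poly % 256) (n % 16) 0 (pvStepB (poly % 256) (n % 16) 1
          (pvStepB (poly % 256) (n % 16) 2 (pvStepB (poly % 256) (n % 16) 3 (c % 256)))) := by
    simp only [crcEntry, List.foldl_cons, List.foldl_nil, pvStepB]
  rw [hA, hB]
  rw [pvStep poly n 0 _ (by norm_num) (by norm_num),
      pvStep poly n 1 _ (by norm_num) (by norm_num),
      pvStep poly n 2 _ (by norm_num) (by norm_num),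
      pvStep poly n 3 _ (by norm_num) (by norm_num)]

theorem pvLookup (p c nib : Int) (hc0 : 0 ≤ c) (hc : c < 256) (hn0 : 0 ≤ nib) (hn : nib < 16) :
    PySem.List.pyGetD (PySem.List.pyGetD (pvTable p) c []) nib 0 = crcEntry c nib p := by
  unfold pvTable
  have hkc : c = ((c.toNat : Nat) : Int) := by omega
  have hkn : nib = ((nib.toNat : Nat) : Int) := by omega
  rw [hkc, hkn, show ((256:Int)) = ((256:Nat):Int) by norm_num,
      show ((16:Int)) = ((16:Nat):Int) by norm_num]
  rw [PySem.List.pyGetD_map_pyRange _ 256 c.toNat [] (by omega)]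
  rw [PySem.List.pyGetD_map_pyRange _ 16 nib.toNat 0 (by omega)]

theorem pvFold (poly : Int) (l : List Int) (c : Int) :
    (l.foldl (fun crc n =>
      (PySem.List.pyRange 3 (-1) (-1)).foldl (fun crc i =>
        let bit := PySem.Int.band (n >>> i) 1
        let crc := if PySem.Int.band crc 128 ≠ 0 then PySem.Int.bxor (crc <<< 1) poly else crc <<< 1
        if bit ≠ 0 then PySem.Int.bxor crc 1 else crc) crc) c) % 256
    = l.foldl (fun crc n =>
        PySem.List.pyGetD (PySem.List.pyGetD (pvTable (PySem.Int.band poly 255)) crc []) (PySem.Int.band n 15) 0)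
        (c % 256) := by
  induction l generalizing c with
  | nil => rfl
  | cons n l ih =>
    simp only [List.foldl]
    rw [ih]
    congr 1
    rw [pvNib poly n c, pvBand15]
    exact (pvLookup (PySem.Int.band poly 255) (c % 256) (n % 16) (by omega) (by omega)
      (by omega) (by omega)).symm

-- ===== VERDICT (by name: the statement is the Claim_ definition above) =====
theorem crc8_oregon_spec : Claim_equal_crc8_oregon := by
  intro nibbles poly init _
  show crc8_oregon nibbles poly init = crc8_oregon_alt nibbles poly init
  unfold crc8_oregon crc8_oregon_alt
  rw [pvBand255, pvBand255 init]
  exact pvFold poly nibbles init
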